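-- pv_equiv track=rewrite | github.com/Leewongi0731/DailyCodeTest | [프로그래머스 레벨2] 방금그곡.py | solution
-- ===== SOURCE A (Python) =====
-- def solution(m, musicinfos):
--     m = m.replace('C#', 'H')
--     m = m.replace('D#', 'I')
--     m = m.replace('F#', 'L')
--     m = m.replace('G#', 'Z')
--     m = m.replace('A#', 'K')
--
--     music_data = [ item.split(',') for item in musicinfos ]
--     buffer = []
--     #하나하나 테스트
--     for sTime, eTime, name, melody in music_data:
--         sTime = sTime.split(':')
--         eTime = eTime.split(':')
--         # runtime
--         sTime = int(sTime[0]) * 60 + int(sTime[1])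
--         eTime = int(eTime[0]) * 60 + int(eTime[1])
--         if sTime > eTime:  eTime += 24*60
--         runTime = eTime - sTime
--
--         melody = melody.replace('C#', 'H')
--         melody = melody.replace('D#', 'I')
--         melody = melody.replace('F#', 'L')
--         melody = melody.replace('G#', 'Z')
--         melody = melody.replace('A#', 'K')
--
--         melody *= runTime
--         melody = melody[:runTime]
--
--         if melody.find( m ) != -1:
--             buffer.append( [runTime, name] )
--
--     #select music
--     if len(buffer) == 0: return "(None)"
--     else:
--         long_music = ""
--         long_time = -1
--         for music in buffer:
--             if music[0] > long_time:
--                 long_time = music[0]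
--                 long_music = music[1]
--     return long_music
-- ===== SOURCE B (Python) =====
-- _CODE = {'C': 'H', 'D': 'I', 'F': 'L', 'G': 'Z', 'A': 'K'}
--
-- def _encode(s):
--     # one-pass scanner: a note letter followed by '#' becomes one coded symbol
--     out = []
--     i = 0
--     while i < len(s):
--         c = s[i]
--         if c in _CODE and i + 1 < len(s) and s[i + 1] == '#':
--             out.append(_CODE[c])
--             i += 2
--         else:
--             out.append(c)
--             i += 1
--     return out
--
-- def _minutes(t):
--     parts = t.split(':')
--     return int(parts[0]) * 60 + int(parts[1])
--
-- def _play(base, n):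
--     # first n symbols of base repeated cyclically (empty if base is empty or n <= 0)
--     if not base:
--         return []
--     return [base[i % len(base)] for i in range(n)]
--
-- def _contains(hay, needle):
--     k = len(needle)
--     return any(hay[i:i + k] == needle for i in range(len(hay) - k + 1))
--
-- def solution(m, musicinfos):
--     query = _encode(m)
--     found, best_time, best_name = False, -1, ""
--     for info in musicinfos:
--         start, end, name, melody = info.split(',')
--         s, e = _minutes(start), _minutes(end)
--         run = e - s if s <= e else e + 1440 - s
--         if _contains(_play(_encode(melody), run), query):
--             found = True
--             if run > best_time:
--                 best_time, best_name = run, name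
--     return best_name if found else "(None)"
-- ===== Notes on version B (the rewrite author's own statement) =====
-- stated objective: alternative
-- what changed: B replaces A's five sequential global string replaces with a single-pass note scanner, builds the played melody by modular indexing into the base instead of string multiplication plus slicing, tests containment by an explicit sliding-window scan instead of str.find, and fuses A's buffer-then-second-scan selection into one loop carrying the running best.
import Mathlib
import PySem

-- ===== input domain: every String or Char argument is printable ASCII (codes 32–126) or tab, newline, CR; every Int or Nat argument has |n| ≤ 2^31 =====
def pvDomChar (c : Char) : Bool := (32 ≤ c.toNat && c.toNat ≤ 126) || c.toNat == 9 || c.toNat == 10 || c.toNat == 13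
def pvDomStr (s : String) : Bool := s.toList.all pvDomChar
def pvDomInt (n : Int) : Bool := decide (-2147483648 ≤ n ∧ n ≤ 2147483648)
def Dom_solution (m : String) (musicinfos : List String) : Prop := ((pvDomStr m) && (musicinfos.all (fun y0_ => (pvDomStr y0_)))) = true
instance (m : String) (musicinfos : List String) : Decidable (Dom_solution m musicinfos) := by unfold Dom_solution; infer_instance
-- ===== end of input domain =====

-- B is an alternative implementation (single-pass note encoder, modular-index playback
-- construction, explicit window scan, fused selection loop) — not claimed faster.

-- ===== PORT A =====
-- the five sequential global replaces of A, applied to m and to each melody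
def srepA (s : String) : String :=
  let s := PySem.Str.replace s "C#" "H"
  let s := PySem.Str.replace s "D#" "I"
  let s := PySem.Str.replace s "F#" "L"
  let s := PySem.Str.replace s "G#" "Z"
  PySem.Str.replace s "A#" "K"

-- one iteration of A's main loop (buffer.append on a match; parse failures are outside Pre_)
def stepA (m1 : List Char) (buffer : List (Int × String)) (item : String) : List (Int × String) :=
  match PySem.Str.split? item "," with
  | some [sT, eT, name, melody] =>
    match PySem.Str.split? sT ":", PySem.Str.split? eT ":" with
    | some sParts, some eParts =>
      match PySem.List.pyGet? sParts 0, PySem.List.pyGet? sParts 1,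
            PySem.List.pyGet? eParts 0, PySem.List.pyGet? eParts 1 with
      | some s0, some s1, some e0, some e1 =>
        match PySem.Int.ofStr? s0, PySem.Int.ofStr? s1, PySem.Int.ofStr? e0, PySem.Int.ofStr? e1 with
        | some sh, some sm, some eh, some em =>
          let sTime := sh * 60 + sm
          let eTime0 := eh * 60 + em
          let eTime := if sTime > eTime0 then eTime0 + 24 * 60 else eTime0
          let runTime := eTime - sTime
          let mel := (srepA melody).toList
          let tiled := PySem.List.pyRepeat mel runTime
          let played := PySem.List.slice tiled none (some runTime)
          if PySem.Chars.find played m1 ≠ -1 then buffer ++ [(runTime, name)] else buffer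
        | _, _, _, _ => buffer
      | _, _, _, _ => buffer
    | _, _ => buffer
  | _ => buffer

def solution (m : String) (musicinfos : List String) : String :=
  let m1 := srepA m
  let buffer := musicinfos.foldl (stepA m1.toList) []
  if buffer = [] then "(None)"
  else
    (buffer.foldl (fun st mu => if mu.1 > st.1 then (mu.1, mu.2) else st) ((-1 : Int), "")).2

-- ===== PORT B =====
def codeB (c : Char) : Char :=
  if c = 'C' then 'H' else if c = 'D' then 'I' else if c = 'F' then 'L'
  else if c = 'G' then 'Z' else 'K'

def isNoteB (c : Char) : Bool := c = 'C' || c = 'D' || c = 'F' || c = 'G' || c = 'A'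

-- B's one-pass scanner: a note letter followed by '#' becomes one coded symbol
def encB : List Char → List Char
  | [] => []
  | [c] => [c]
  | c :: d :: t =>
    if isNoteB c && d = '#' then codeB c :: encB t else c :: encB (d :: t)

-- B's _minutes helper (none where the Python helper raises; outside Pre_)
def minutesB? (t : String) : Option Int :=
  let parts := (PySem.Str.split? t ":").getD []
  match PySem.List.pyGet? parts 0, PySem.List.pyGet? parts 1 with
  | some p0, some p1 =>
    match PySem.Int.ofStr? p0, PySem.Int.ofStr? p1 with
    | some a, some b => some (a * 60 + b)
    | _, _ => none
  | _, _ => none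

-- B's _play: first n symbols of base repeated cyclically
def playB (base : List Char) (n : Int) : List Char :=
  if base = [] then []
  else (PySem.List.pyRange 0 n 1).map
    (fun i => PySem.List.pyGetD base (PySem.Int.mod i (base.length : Int)) ' ')

-- B's _contains: explicit window scan
def containsB (hay needle : List Char) : Bool :=
  (PySem.List.pyRange 0 ((hay.length : Int) - (needle.length : Int) + 1) 1).any
    (fun i => PySem.List.slice hay (some i) (some (i + (needle.length : Int))) == needle)

-- one iteration of B's fused loop over (found, best_time, best_name)
def stepB (query : List Char) (st : Bool × Int × String) (info : String) : Bool × Int × String :=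
  match PySem.Str.split? info "," with
  | some [start, end_, name, melody] =>
    match minutesB? start, minutesB? end_ with
    | some s, some e =>
      let run := if s ≤ e then e - s else e + 1440 - s
      if containsB (playB (encB melody.toList) run) query then
        (true, if run > st.2.1 then (run, name) else (st.2.1, st.2.2))
      else st
    | _, _ => st
  | _ => st

def solution_alt (m : String) (musicinfos : List String) : String :=
  let query := encB m.toList
  let st := musicinfos.foldl (stepB query) (false, (-1 : Int), "")
  if st.1 then st.2.2 else "(None)"

-- ===== PRECONDITION & SPEC =====
-- Pre_: exactly the inputs where Python A returns normally: each item splits on ',' into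
-- exactly 4 fields and both time fields split on ':' into ≥ 2 parts whose first two parse as int.
def timeOkPre (t : String) : Bool :=
  let parts := (PySem.Str.split? t ":").getD []
  decide (2 ≤ parts.length) && (PySem.Int.ofStr? (parts.getD 0 "")).isSome
    && (PySem.Int.ofStr? (parts.getD 1 "")).isSome

def itemOkPre (item : String) : Bool :=
  match PySem.Str.split? item "," with
  | some [sT, eT, _, _] => timeOkPre sT && timeOkPre eT
  | _ => false

def Pre_solution (m : String) (musicinfos : List String) : Prop :=
  musicinfos.all itemOkPre = true

instance (m : String) (musicinfos : List String) : Decidable (Pre_solution m musicinfos) := by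
  unfold Pre_solution; infer_instance

def pvWitness_solution : String × List String := ("CC#A", ["12:00,12:06,WORLD,C#CC#AB", "01:05,01:03,HELLO,A#"])

def Spec_solution (m : String) (musicinfos : List String) (out : String) : Prop := out = solution_alt m musicinfos
instance (m : String) (musicinfos : List String) (out : String) : Decidable (Spec_solution m musicinfos out) := by unfold Spec_solution; infer_instance

-- ===== CLAIM (what is proved, stated in full; the proofs are below) =====
def Claim_equal_solution : Prop := ∀ (m : String) (musicinfos : List String), Dom_solution m musicinfos → Pre_solution m musicinfos → Spec_solution m musicinfos (solution m musicinfos)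

-- ===== LEMMAS AND PROOFS =====


def rep2 (a b r : Char) : List Char → List Char
  | [] => []
  | [x] => [x]
  | x :: y :: t => if x = a ∧ y = b then r :: rep2 a b r t else x :: rep2 a b r (y :: t)

lemma go_eq (a b r : Char) : ∀ (fuel : Nat) (l acc : List Char), l.length ≤ fuel →
    PySem.Chars.replace.go [a, b] [r] fuel l acc = acc.reverse ++ rep2 a b r l := by
  intro fuel
  induction fuel with
  | zero =>
    intro l acc h
    have : l = [] := by rcases l with _|_ <;> simp_all
    subst this; simp [PySem.Chars.replace.go, rep2]
  | succ n ih =>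
    intro l acc h
    rcases l with _ | ⟨c, t⟩
    · simp [PySem.Chars.replace.go, rep2]
    · rw [PySem.Chars.replace.go]
      by_cases hp : List.isPrefixOf [a, b] (c :: t) = true
      · rw [if_pos hp]
        rcases t with _ | ⟨d, t'⟩
        · simp [List.isPrefixOf] at hp
        · have hca : c = a ∧ d = b := by
            simp [List.isPrefixOf] at hp; exact ⟨hp.1.symm, hp.2.symm⟩
          rw [ih _ _ (by simp at h ⊢; omega)]
          simp [rep2, hca.1, hca.2]
      · rw [if_neg hp, ih _ _ (by simp at h ⊢; omega)]
        rcases t with _ | ⟨d, t'⟩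
        · simp [rep2]
        · have : ¬ (c = a ∧ d = b) := by
            intro ⟨h1, h2⟩; subst h1; subst h2; simp [List.isPrefixOf] at hp
          simp [rep2, this]

lemma replace_eq_rep2 (a b r : Char) (s : List Char) :
    PySem.Chars.replace s [a, b] [r] = rep2 a b r s := by
  rw [PySem.Chars.replace]
  simp [go_eq a b r s.length s [] (le_refl _)]

lemma rep2_pass (a b r c : Char) (u : List Char) (h : c ≠ a ∨ u.head? ≠ some b) :
    rep2 a b r (c :: u) = c :: rep2 a b r u := by
  rcases u with _ | ⟨d, t⟩
  · simp [rep2]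
  · have : ¬ (c = a ∧ d = b) := by
      rintro ⟨h1, h2⟩; rcases h with h | h
      · exact h h1
      · simp [h2] at h
    simp [rep2, this]

lemma rep2_head (a b r : Char) (u : List Char) (hr : r ≠ b) (h : u.head? ≠ some b) :
    (rep2 a b r u).head? ≠ some b := by
  rcases u with _ | ⟨x, _ | ⟨y, t⟩⟩
  · simp [rep2]
  · simpa [rep2] using h
  · by_cases hc : x = a ∧ y = b
    · simp [rep2, hc, hr]
    · simpa [rep2, hc] using h

def chainL (s : List Char) : List Char :=
  rep2 'A' '#' 'K' (rep2 'G' '#' 'Z' (rep2 'F' '#' 'L' (rep2 'D' '#' 'I' (rep2 'C' '#' 'H' s))))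

lemma chain_eq_encB (s : List Char) : chainL s = encB s := by
  fun_induction encB s with
  | case1 => simp [chainL, rep2]
  | case2 c => simp [chainL, rep2]
  | case3 c d t hcond ih =>
    simp only [Bool.and_eq_true, decide_eq_true_eq] at hcond
    obtain ⟨hn, hd⟩ := hcond
    subst hd
    simp only [isNoteB, Bool.or_eq_true, decide_eq_true_eq] at hn
    unfold chainL at ih ⊢
    rcases hn with ((((h | h) | h) | h) | h) <;> subst h
    · rw [show rep2 'C' '#' 'H' ('C' :: '#' :: t) = 'H' :: rep2 'C' '#' 'H' t from by simp [rep2]]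
      rw [rep2_pass _ _ _ _ _ (Or.inl (by decide)), rep2_pass _ _ _ _ _ (Or.inl (by decide)),
          rep2_pass _ _ _ _ _ (Or.inl (by decide)), rep2_pass _ _ _ _ _ (Or.inl (by decide))]
      simp [ih, codeB]
    · rw [rep2_pass 'C' '#' 'H' _ _ (Or.inl (by decide)), rep2_pass 'C' '#' 'H' _ _ (Or.inl (by decide))]
      rw [show rep2 'D' '#' 'I' ('D' :: '#' :: rep2 'C' '#' 'H' t) = 'I' :: rep2 'D' '#' 'I' (rep2 'C' '#' 'H' t) from by simp [rep2]]
      rw [rep2_pass _ _ _ _ _ (Or.inl (by decide)), rep2_pass _ _ _ _ _ (Or.inl (by decide)),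
          rep2_pass _ _ _ _ _ (Or.inl (by decide))]
      simp [ih, codeB]
    · rw [rep2_pass 'C' '#' 'H' _ _ (Or.inl (by decide)), rep2_pass 'C' '#' 'H' _ _ (Or.inl (by decide))]
      rw [rep2_pass 'D' '#' 'I' _ _ (Or.inl (by decide)), rep2_pass 'D' '#' 'I' _ _ (Or.inl (by decide))]
      rw [show rep2 'F' '#' 'L' ('F' :: '#' :: rep2 'D' '#' 'I' (rep2 'C' '#' 'H' t)) = 'L' :: rep2 'F' '#' 'L' (rep2 'D' '#' 'I' (rep2 'C' '#' 'H' t)) from by simp [rep2]]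
      rw [rep2_pass _ _ _ _ _ (Or.inl (by decide)), rep2_pass _ _ _ _ _ (Or.inl (by decide))]
      simp [ih, codeB]
    · rw [rep2_pass 'C' '#' 'H' _ _ (Or.inl (by decide)), rep2_pass 'C' '#' 'H' _ _ (Or.inl (by decide))]
      rw [rep2_pass 'D' '#' 'I' _ _ (Or.inl (by decide)), rep2_pass 'D' '#' 'I' _ _ (Or.inl (by decide))]
      rw [rep2_pass 'F' '#' 'L' _ _ (Or.inl (by decide)), rep2_pass 'F' '#' 'L' _ _ (Or.inl (by decide))]
      rw [show rep2 'G' '#' 'Z' ('G' :: '#' :: rep2 'F' '#' 'L' (rep2 'D' '#' 'I' (rep2 'C' '#' 'H' t))) = 'Z' :: rep2 'G' '#' 'Z' (rep2 'F' '#' 'L' (rep2 'D' '#' 'I' (rep2 'C' '#' 'H' t))) from by simp [rep2]]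
      rw [rep2_pass _ _ _ _ _ (Or.inl (by decide))]
      simp [ih, codeB]
    · rw [rep2_pass 'C' '#' 'H' _ _ (Or.inl (by decide)), rep2_pass 'C' '#' 'H' _ _ (Or.inl (by decide))]
      rw [rep2_pass 'D' '#' 'I' _ _ (Or.inl (by decide)), rep2_pass 'D' '#' 'I' _ _ (Or.inl (by decide))]
      rw [rep2_pass 'F' '#' 'L' _ _ (Or.inl (by decide)), rep2_pass 'F' '#' 'L' _ _ (Or.inl (by decide))]
      rw [rep2_pass 'G' '#' 'Z' _ _ (Or.inl (by decide)), rep2_pass 'G' '#' 'Z' _ _ (Or.inl (by decide))]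
      rw [show rep2 'A' '#' 'K' ('A' :: '#' :: rep2 'G' '#' 'Z' (rep2 'F' '#' 'L' (rep2 'D' '#' 'I' (rep2 'C' '#' 'H' t)))) = 'K' :: rep2 'A' '#' 'K' (rep2 'G' '#' 'Z' (rep2 'F' '#' 'L' (rep2 'D' '#' 'I' (rep2 'C' '#' 'H' t)))) from by simp [rep2]]
      simp [ih, codeB]
  | case4 c d t hcond ih =>
    unfold chainL at ih ⊢
    by_cases hd : d = '#'
    · subst hd
      have hn : isNoteB c = false := by
        cases hb : isNoteB c
        · rfl
        · simp [hb] at hcond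
      simp only [isNoteB, Bool.or_eq_false_iff, decide_eq_false_iff_not] at hn
      obtain ⟨⟨⟨⟨h1, h2⟩, h3⟩, h4⟩, h5⟩ := hn
      rw [rep2_pass _ _ _ _ _ (Or.inl h1), rep2_pass _ _ _ _ _ (Or.inl h2),
          rep2_pass _ _ _ _ _ (Or.inl h3), rep2_pass _ _ _ _ _ (Or.inl h4),
          rep2_pass _ _ _ _ _ (Or.inl h5), ih]
    · have h0 : (d :: t).head? ≠ some '#' := by simpa using hd
      have h1 := rep2_head 'C' '#' 'H' (d :: t) (by decide) h0
      have h2 := rep2_head 'D' '#' 'I' _ (by decide) h1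
      have h3 := rep2_head 'F' '#' 'L' _ (by decide) h2
      have h4 := rep2_head 'G' '#' 'Z' _ (by decide) h3
      rw [rep2_pass _ _ _ _ _ (Or.inr h0), rep2_pass _ _ _ _ _ (Or.inr h1),
          rep2_pass _ _ _ _ _ (Or.inr h2), rep2_pass _ _ _ _ _ (Or.inr h3),
          rep2_pass _ _ _ _ _ (Or.inr h4), ih]

lemma flatten_replicate_getElem (mel : List Char) (n i : Nat) (hL : mel ≠ [])
    (h : i < ((List.replicate n mel).flatten).length) :
    (List.replicate n mel).flatten[i] =
      mel[i % mel.length]'(Nat.mod_lt _ (Nat.pos_of_ne_zero (by simp [hL]))) := by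
  induction n generalizing i with
  | zero => simp at h
  | succ n ih =>
    simp only [List.replicate_succ, List.flatten_cons] at h ⊢
    rcases Nat.lt_or_ge i mel.length with hi | hi
    · rw [List.getElem_append_left hi]
      congr 1
      exact (Nat.mod_eq_of_lt hi).symm
    · rw [List.getElem_append_right hi]
      have hb : i - mel.length < (List.replicate n mel).flatten.length := by
        simp only [List.length_append] at h
        omega
      rw [ih _ hb]
      congr 1
      exact (Nat.mod_eq_sub_mod hi).symm

lemma tiling (mel : List Char) (rt : Int) :
    PySem.List.slice (PySem.List.pyRepeat mel rt) none (some rt) = playB mel rt := by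
  by_cases hm : mel = []
  · subst hm
    simp [playB, PySem.List.pyRepeat, PySem.List.slice]
  · rw [playB, if_neg hm]
    by_cases hrt : rt ≤ 0
    · have h1 : PySem.List.pyRange 0 rt 1 = [] := by simp [PySem.List.pyRange]; omega
      have h0 : PySem.List.pyRepeat mel rt = [] := by
        simp [PySem.List.pyRepeat, (by omega : rt.toNat = 0)]
      rw [h0, h1]
      simp [PySem.List.slice]
    · have hk : rt = ((rt.toNat : Nat) : Int) := by omega
      rw [PySem.List.slice_to _ (by omega : (0:Int) ≤ rt), PySem.List.pyRepeat]
      generalize hkk : rt.toNat = k at hk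
      rw [hk, PySem.List.pyRange_zero_natCast, List.map_map]
      have hLpos : 0 < mel.length := Nat.pos_of_ne_zero (by simp [hm])
      have hlen : ((List.replicate k mel).flatten).length = k * mel.length := by
        simp
      apply List.ext_getElem
      · simp [hlen]
        exact Nat.le_mul_of_pos_right k hLpos
      · intro i h1 h2
        rw [List.getElem_take, flatten_replicate_getElem mel k i hm]
        simp only [List.getElem_map, List.getElem_range, Function.comp]
        rw [PySem.Int.mod_natCast, PySem.List.pyGetD_natCast]
        rw [List.getD_eq_getElem _ _ (Nat.mod_lt _ hLpos)]

lemma containsB_iff (hay q : List Char) :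
    containsB hay q = true ↔ PySem.Chars.find hay q ≠ -1 := by
  rw [PySem.Chars.find_ne_neg_one_iff, containsB, List.any_eq_true]
  constructor
  · rintro ⟨i, hmem, heq⟩
    rw [PySem.List.mem_pyRange_one] at hmem
    obtain ⟨j, rfl⟩ : ∃ j : Nat, i = (j : Int) := ⟨i.toNat, by omega⟩
    rw [PySem.List.slice_natCast_add, beq_iff_eq] at heq
    have hpre : q <+: hay.drop j := by
      rw [List.prefix_iff_eq_take]
      rw [← heq]
      congr 1
      rw [← heq]
      simp
    exact hpre.isInfix.trans (List.drop_suffix j hay).isInfix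
  · rintro ⟨pre, suf, rfl⟩
    refine ⟨(pre.length : Int), ?_, ?_⟩
    · rw [PySem.List.mem_pyRange_one]
      constructor
      · omega
      · simp only [List.length_append]
        push_cast
        omega
    · rw [PySem.List.slice_natCast_add, beq_iff_eq, List.append_assoc, List.drop_left]
      exact List.take_left

-- A's five replaces, as the five-pass recursion
lemma srepA_toList (s : String) : (srepA s).toList = encB s.toList := by
  unfold srepA
  simp only [PySem.Str.toList_replace]
  have c1 : ("C#" : String).toList = ['C', '#'] := rfl
  have c2 : ("D#" : String).toList = ['D', '#'] := rfl
  have c3 : ("F#" : String).toList = ['F', '#'] := rfl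
  have c4 : ("G#" : String).toList = ['G', '#'] := rfl
  have c5 : ("A#" : String).toList = ['A', '#'] := rfl
  have h1 : ("H" : String).toList = ['H'] := rfl
  have h2 : ("I" : String).toList = ['I'] := rfl
  have h3 : ("L" : String).toList = ['L'] := rfl
  have h4 : ("Z" : String).toList = ['Z'] := rfl
  have h5 : ("K" : String).toList = ['K'] := rfl
  rw [c1, c2, c3, c4, c5, h1, h2, h3, h4, h5]
  rw [replace_eq_rep2, replace_eq_rep2, replace_eq_rep2, replace_eq_rep2, replace_eq_rep2]
  exact chain_eq_encB s.toList

-- selection step of A's second loop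
def selA (st : Int × String) (mu : Int × String) : Int × String :=
  if mu.1 > st.1 then (mu.1, mu.2) else st

-- invert a successful minutesB? computation
lemma minutesB?_inv (t : String) (v : Int) (h : minutesB? t = some v) :
    ∃ parts p0 p1 a b, PySem.Str.split? t ":" = some parts ∧
      PySem.List.pyGet? parts 0 = some p0 ∧ PySem.List.pyGet? parts 1 = some p1 ∧
      PySem.Int.ofStr? p0 = some a ∧ PySem.Int.ofStr? p1 = some b ∧ v = a * 60 + b := by
  unfold minutesB? at h
  rcases hsp : PySem.Str.split? t ":" with _ | parts <;> rw [hsp] at h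
  · simp [PySem.List.pyGet?] at h
  · simp only [Option.getD_some] at h
    rcases hg1 : PySem.List.pyGet? parts 0 with _ | p0 <;> simp only [hg1] at h
    · exact absurd h (by simp)
    · rcases hg2 : PySem.List.pyGet? parts 1 with _ | p1 <;> simp only [hg2] at h
      · exact absurd h (by simp)
      · rcases ho1 : PySem.Int.ofStr? p0 with _ | a <;> simp only [ho1] at h
        · exact absurd h (by simp)
        · rcases ho2 : PySem.Int.ofStr? p1 with _ | b <;> simp only [ho2] at h
          · exact absurd h (by simp)
          · exact ⟨parts, p0, p1, a, b, rfl, hg1, hg2, ho1, ho2, by simpa using h.symm⟩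

lemma stepA_succ (q : List Char) (item sT eT name melody : String) (sv ev : Int)
    (hsplit : PySem.Str.split? item "," = some [sT, eT, name, melody])
    (hs : minutesB? sT = some sv) (he : minutesB? eT = some ev) (buf : List (Int × String)) :
    stepA q buf item =
      (if PySem.Chars.find (PySem.List.slice
            (PySem.List.pyRepeat (srepA melody).toList ((if sv > ev then ev + 24 * 60 else ev) - sv))
            none (some ((if sv > ev then ev + 24 * 60 else ev) - sv))) q ≠ -1
        then buf ++ [((if sv > ev then ev + 24 * 60 else ev) - sv, name)] else buf) := by
  obtain ⟨sParts, s0, s1, a, b, hsp, hg1, hg2, ho1, ho2, hveq⟩ := minutesB?_inv sT sv hs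
  obtain ⟨eParts, e0, e1, c, d, hep, hg3, hg4, ho3, ho4, hweq⟩ := minutesB?_inv eT ev he
  subst hveq hweq
  simp only [stepA, hsplit, hsp, hep, hg1, hg2, hg3, hg4, ho1, ho2, ho3, ho4]

lemma stepA_skip (q : List Char) (item sT eT name melody : String)
    (hsplit : PySem.Str.split? item "," = some [sT, eT, name, melody])
    (h : minutesB? sT = none ∨ minutesB? eT = none) (buf : List (Int × String)) :
    stepA q buf item = buf := by
  simp only [stepA, hsplit]
  rcases hsp : PySem.Str.split? sT ":" with _ | sParts
  · rfl
  · rcases hep : PySem.Str.split? eT ":" with _ | eParts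
    · rfl
    · rcases hg1 : PySem.List.pyGet? sParts 0 with _ | s0
      · simp only [hg1]
      · rcases hg2 : PySem.List.pyGet? sParts 1 with _ | s1
        · simp only [hg1, hg2]
        · rcases hg3 : PySem.List.pyGet? eParts 0 with _ | e0
          · simp only [hg1, hg2, hg3]
          · rcases hg4 : PySem.List.pyGet? eParts 1 with _ | e1
            · simp only [hg1, hg2, hg3, hg4]
            · rcases ho1 : PySem.Int.ofStr? s0 with _ | a
              · simp only [hg1, hg2, hg3, hg4, ho1]
              · rcases ho2 : PySem.Int.ofStr? s1 with _ | b
                · simp only [hg1, hg2, hg3, hg4, ho1, ho2]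
                · rcases ho3 : PySem.Int.ofStr? e0 with _ | c
                  · simp only [hg1, hg2, hg3, hg4, ho1, ho2, ho3]
                  · rcases ho4 : PySem.Int.ofStr? e1 with _ | d
                    · simp only [hg1, hg2, hg3, hg4, ho1, ho2, ho3, ho4]
                    · exfalso
                      rcases h with h | h <;>
                        simp [minutesB?, hsp, hep, hg1, hg2, hg3, hg4,
                          ho1, ho2, ho3, ho4] at h

lemma stepB_skip (q : List Char) (item sT eT name melody : String)
    (hsplit : PySem.Str.split? item "," = some [sT, eT, name, melody])
    (h : minutesB? sT = none ∨ minutesB? eT = none) (st : Bool × Int × String) :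
    stepB q st item = st := by
  rcases hms : minutesB? sT with _ | v
  · simp only [stepB, hsplit, hms]
  · rcases h with h | h
    · rw [h] at hms; cases hms
    · simp only [stepB, hsplit, hms, h]

-- each item either leaves both loops' states unchanged, or contributes the same (runTime, name)
lemma step_cases (q : List Char) (item : String) :
    ((∀ buf, stepA q buf item = buf) ∧ (∀ st, stepB q st item = st)) ∨
    (∃ r nm, (∀ buf, stepA q buf item = buf ++ [(r, nm)]) ∧
      (∀ st : Bool × Int × String,
        stepB q st item = (true, if r > st.2.1 then (r, nm) else (st.2.1, st.2.2)))) := by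
  rcases hsplit : PySem.Str.split? item "," with _ | parts
  · left; exact ⟨fun _ => by simp [stepA, hsplit], fun _ => by simp [stepB, hsplit]⟩
  · match parts with
    | [] => left; exact ⟨fun _ => by simp [stepA, hsplit], fun _ => by simp [stepB, hsplit]⟩
    | [_] => left; exact ⟨fun _ => by simp [stepA, hsplit], fun _ => by simp [stepB, hsplit]⟩
    | [_, _] => left; exact ⟨fun _ => by simp [stepA, hsplit], fun _ => by simp [stepB, hsplit]⟩
    | [_, _, _] =>
      left; exact ⟨fun _ => by simp [stepA, hsplit], fun _ => by simp [stepB, hsplit]⟩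
    | _ :: _ :: _ :: _ :: _ :: _ =>
      left; exact ⟨fun _ => by simp [stepA, hsplit], fun _ => by simp [stepB, hsplit]⟩
    | [sT, eT, name, melody] =>
      rcases hms : minutesB? sT with _ | sv
      · exact Or.inl ⟨stepA_skip q item sT eT name melody hsplit (Or.inl hms),
          stepB_skip q item sT eT name melody hsplit (Or.inl hms)⟩
      · rcases hme : minutesB? eT with _ | ev
        · exact Or.inl ⟨stepA_skip q item sT eT name melody hsplit (Or.inr hme),
            stepB_skip q item sT eT name melody hsplit (Or.inr hme)⟩
        · have hrun : (if sv ≤ ev then ev - sv else ev + 1440 - sv) =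
              (if sv > ev then ev + 24 * 60 else ev) - sv := by
            split_ifs with hA hB <;> omega
          have hmel : (srepA melody).toList = encB melody.toList := srepA_toList melody
          have hplayed : playB (encB melody.toList) ((if sv > ev then ev + 24 * 60 else ev) - sv) =
              PySem.List.slice
                (PySem.List.pyRepeat (srepA melody).toList ((if sv > ev then ev + 24 * 60 else ev) - sv))
                none (some ((if sv > ev then ev + 24 * 60 else ev) - sv)) := by
            rw [hmel, tiling]
          by_cases hfind : PySem.Chars.find (PySem.List.slice
              (PySem.List.pyRepeat (srepA melody).toList ((if sv > ev then ev + 24 * 60 else ev) - sv))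
              none (some ((if sv > ev then ev + 24 * 60 else ev) - sv))) q ≠ -1
          · right
            refine ⟨(if sv > ev then ev + 24 * 60 else ev) - sv, name, fun buf => ?_, fun st => ?_⟩
            · rw [stepA_succ q item sT eT name melody sv ev hsplit hms hme buf, if_pos hfind]
            · simp only [stepB, hsplit, hms, hme]
              have hc : containsB (playB (encB melody.toList)
                  (if sv ≤ ev then ev - sv else ev + 1440 - sv)) q = true := by
                rw [hrun, hplayed, containsB_iff]; exact hfind
              rw [hc, if_pos rfl, hrun]
          · left
            refine ⟨fun buf => ?_, fun st => ?_⟩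
            · rw [stepA_succ q item sT eT name melody sv ev hsplit hms hme buf, if_neg hfind]
            · simp only [stepB, hsplit, hms, hme]
              have hc : containsB (playB (encB melody.toList)
                  (if sv ≤ ev then ev - sv else ev + 1440 - sv)) q = false := by
                rw [hrun, hplayed]
                cases hcc : containsB (PySem.List.slice
                    (PySem.List.pyRepeat (srepA melody).toList
                      ((if sv > ev then ev + 24 * 60 else ev) - sv))
                    none (some ((if sv > ev then ev + 24 * 60 else ev) - sv))) q
                · rfl
                · exfalso
                  rw [containsB_iff] at hcc
                  exact hfind hcc
              rw [hc]
              simp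

-- the fused loop of B tracks (buffer nonempty, running selection over buffer) of A's loops
lemma fold_inv (q : List Char) (items : List String) :
    ∀ (buf : List (Int × String)) (found : Bool) (best : Int × String),
      found = !buf.isEmpty → best = buf.foldl selA ((-1 : Int), "") →
      items.foldl (stepB q) (found, best) =
        (!(items.foldl (stepA q) buf).isEmpty,
          (items.foldl (stepA q) buf).foldl selA ((-1 : Int), "")) := by
  induction items with
  | nil => intro buf found best h1 h2; simp [h1, h2]
  | cons item rest ih =>
    intro buf found best h1 h2
    rcases step_cases q item with ⟨ha, hb⟩ | ⟨r, nm, ha, hb⟩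
    · simp only [List.foldl_cons, ha, hb]
      exact ih buf found best h1 h2
    · simp only [List.foldl_cons, ha, hb]
      apply ih
      · simp
      · rw [List.foldl_append]
        simp only [List.foldl_cons, List.foldl_nil, selA, h2]

-- ===== VERDICT (by name: the statement is the Claim_ definition above) =====
theorem solution_spec : Claim_equal_solution := by
  intro m musicinfos _ _
  unfold Spec_solution
  show solution m musicinfos = solution_alt m musicinfos
  simp only [solution, solution_alt]
  have hsel : (fun (st mu : Int × String) => if mu.1 > st.1 then (mu.1, mu.2) else st) = selA := rfl
  rw [hsel, srepA_toList m]
  rw [fold_inv (encB m.toList) musicinfos [] false ((-1 : Int), "") (by simp) (by simp)]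
  by_cases hb : musicinfos.foldl (stepA (encB m.toList)) [] = []
  · simp [hb]
  · simp [hb]
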